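-- pv_equiv track=rewrite | github.com/AdamZhouSE/pythonHomework | Code/CodeRecords/2566/60602/281841.py | UWgame
-- ===== SOURCE A (Python) =====
-- def UWgame(HP,i,j,map):
--     if(i==len(map)-1 and j==len(map[0])-1):
--         if(HP+map[i][j]>0):
--             return True;
--         else:
--             return False;
--     else:
--         if(i>len(map)-1 or j>len(map[0])-1):
--             return False;
--         else:
--             if (HP + map[i][j] > 0):
--                 return UWgame(HP + map[i][j],i+1,j,map) or UWgame(HP + map[i][j],i,j+1,map);
--             else:
--                 return False;
-- ===== SOURCE B (Python) =====
-- def UWgame(HP, i, j, map):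
--     # bottom-up DP: minimal HP needed at each cell to reach the exit alive
--     m = len(map)
--     w = len(map[0])
--     if i > m - 1 or j > w - 1:
--         return False
--     below = None
--     for r in range(m - 1, i - 1, -1):
--         cur = []
--         for c in range(w - 1, j - 1, -1):
--             v = map[r][c]
--             if below is None:
--                 t = 1 if c == w - 1 else cur[0]
--             elif c == w - 1:
--                 t = below[c - j]
--             else:
--                 t = min(below[c - j], cur[0])
--             cur = [max(1 - v, t - v)] + cur
--         below = cur
--     return HP >= below[0]
-- ===== Notes on version B (the rewrite author's own statement) =====
-- stated objective: faster
-- what changed: Replaced A's exponential branching recursion over all right/down paths by a bottom-up O(mn) dynamic program that tabulates, per cell of the start-to-exit rectangle, the minimal HP needed there to reach the exit alive, then compares HP with the start cell's requirement.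
-- outside the precondition, e.g. on UWgame(1, 0, 0, [[1, -5], [-100]]): A returns False, B raises IndexError
import Mathlib
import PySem

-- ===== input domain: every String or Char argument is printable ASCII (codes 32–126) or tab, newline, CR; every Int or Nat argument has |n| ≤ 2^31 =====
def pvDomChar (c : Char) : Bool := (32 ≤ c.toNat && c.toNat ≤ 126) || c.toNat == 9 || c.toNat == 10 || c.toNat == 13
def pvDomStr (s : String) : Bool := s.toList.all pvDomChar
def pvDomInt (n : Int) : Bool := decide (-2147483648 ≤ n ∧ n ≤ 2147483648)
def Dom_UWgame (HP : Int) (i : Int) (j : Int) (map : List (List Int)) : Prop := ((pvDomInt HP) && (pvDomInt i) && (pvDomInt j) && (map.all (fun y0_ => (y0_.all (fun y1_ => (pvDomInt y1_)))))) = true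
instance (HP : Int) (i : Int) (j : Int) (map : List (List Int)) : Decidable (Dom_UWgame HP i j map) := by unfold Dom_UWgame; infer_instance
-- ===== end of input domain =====

-- B replaces A's exponential recursion over all right/down paths by a bottom-up O(mn)
-- dynamic program over the start-to-exit rectangle (minimal HP needed per cell).


-- ===== PORT A =====
-- map[r][c] with Python semantics (negative indices wrap); the defaults 0/[] are only
-- reached outside Pre_UWgame, where the real Python raises IndexError.
def pvCell (map : List (List Int)) (r c : Int) : Int :=
  PySem.List.pyGetD (PySem.List.pyGetD map r []) c 0

def UWgame (HP : Int) (i : Int) (j : Int) (map : List (List Int)) : Bool :=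
  if i = (map.length : Int) - 1 ∧ j = ((map.headD []).length : Int) - 1 then
    decide (HP + pvCell map i j > 0)
  else if h : i > (map.length : Int) - 1 ∨ j > ((map.headD []).length : Int) - 1 then
    false
  else if HP + pvCell map i j > 0 then
    UWgame (HP + pvCell map i j) (i + 1) j map || UWgame (HP + pvCell map i j) i (j + 1) map
  else
    false
termination_by (((map.length : Int) - i) + (((map.headD []).length : Int) - j)).toNat
decreasing_by all_goals omega

-- ===== PORT B =====
-- inner loop body: one cell of the current DP row (minimal needed HP), prepended to cur
def pvColStep (map : List (List Int)) (w j r : Int) (below : Option (List Int))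
    (cur : List Int) (c : Int) : List Int :=
  let v := pvCell map r c
  let t : Int :=
    match below with
    | none => if c = w - 1 then 1 else PySem.List.pyGetD cur 0 0
    | some bl =>
        if c = w - 1 then PySem.List.pyGetD bl (c - j) 0
        else min (PySem.List.pyGetD bl (c - j) 0) (PySem.List.pyGetD cur 0 0)
  max (1 - v) (t - v) :: cur

-- one row of the DP: fold the columns from w-1 down to j
def pvRowStep (map : List (List Int)) (w j : Int) (below : Option (List Int)) (r : Int) :
    Option (List Int) :=
  some ((PySem.List.pyRange (w - 1) (j - 1) (-1)).foldl (pvColStep map w j r below) [])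

def UWgame_alt (HP : Int) (i : Int) (j : Int) (map : List (List Int)) : Bool :=
  let m : Int := map.length
  let w : Int := (map.headD []).length
  if i > m - 1 || j > w - 1 then false
  else
    let below := (PySem.List.pyRange (m - 1) (i - 1) (-1)).foldl (pvRowStep map w j) none
    decide (HP ≥ PySem.List.pyGetD (below.getD []) 0 0)

-- ===== PRECONDITION & SPEC =====
-- Pre_ excludes exactly the inputs on which the Python A raises IndexError: the empty map,
-- starts below the negative-wraparound range, and (when the start lies in the rectangle)
-- ragged maps — on a ragged map whether A raises depends on which cells a surviving path
-- visits, which is not a closed-form input property, so ragged in-rectangle starts are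
-- excluded wholesale (B's DP touches every rectangle cell and may raise where A returns).
def Pre_UWgame (HP : Int) (i : Int) (j : Int) (map : List (List Int)) : Prop :=
  map ≠ [] ∧
  (i > (map.length : Int) - 1 ∨ j > ((map.headD []).length : Int) - 1 ∨
    (-(map.length : Int) ≤ i ∧ -((map.headD []).length : Int) ≤ j ∧
      ∀ row ∈ map, row.length = (map.headD []).length))
instance (HP : Int) (i : Int) (j : Int) (map : List (List Int)) : Decidable (Pre_UWgame HP i j map) := by
  unfold Pre_UWgame; infer_instance

def pvWitness_UWgame : Int × Int × Int × List (List Int) := (5, 0, 0, [[1, -2], [-3, 4]])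

def Spec_UWgame (HP : Int) (i : Int) (j : Int) (map : List (List Int)) (out : Bool) : Prop := out = UWgame_alt HP i j map
instance (HP : Int) (i : Int) (j : Int) (map : List (List Int)) (out : Bool) : Decidable (Spec_UWgame HP i j map out) := by unfold Spec_UWgame; infer_instance

-- ===== CLAIM (what is proved, stated in full; the proofs are below) =====
def Claim_equal_UWgame : Prop := ∀ (HP : Int) (i : Int) (j : Int) (map : List (List Int)), Dom_UWgame HP i j map → Pre_UWgame HP i j map → Spec_UWgame HP i j map (UWgame HP i j map)

-- ===== LEMMAS AND PROOFS =====

-- minimal HP needed at (r,c) (before adding the cell) to reach the exit with every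
-- intermediate total positive; mathematical reference both ports are compared against
def needF (map : List (List Int)) (w : Int) (r c : Int) : Int :=
  if h : r > (map.length : Int) - 1 ∨ c > w - 1 then 0
  else
    max (1 - pvCell map r c)
      ((if r = (map.length : Int) - 1 then
          (if c = w - 1 then 1 else needF map w r (c + 1))
        else if c = w - 1 then needF map w (r + 1) c
        else min (needF map w (r + 1) c) (needF map w r (c + 1))) - pvCell map r c)
termination_by (((map.length : Int) - r) + (w - c)).toNat
decreasing_by all_goals omega

theorem needF_eq (map : List (List Int)) (w r c : Int)
    (hr : r ≤ (map.length : Int) - 1) (hc : c ≤ w - 1) :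
    needF map w r c =
      max (1 - pvCell map r c)
        ((if r = (map.length : Int) - 1 then
            (if c = w - 1 then 1 else needF map w r (c + 1))
          else if c = w - 1 then needF map w (r + 1) c
          else min (needF map w (r + 1) c) (needF map w r (c + 1))) - pvCell map r c) := by
  rw [needF, dif_neg (by omega)]

theorem UWgame_eq_needF (map : List (List Int)) :
    ∀ (n : Nat) (HP r c : Int),
      (((map.length : Int) - r) + (((map.headD []).length : Int) - c)).toNat ≤ n →
      r ≤ (map.length : Int) - 1 → c ≤ ((map.headD []).length : Int) - 1 →
      UWgame HP r c map = decide (needF map ((map.headD []).length : Int) r c ≤ HP) := by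
  intro n
  induction n with
  | zero => intro HP r c hn hr hc; omega
  | succ n ih =>
    intro HP r c hn hr hc
    rw [UWgame]
    by_cases hexit : r = (map.length : Int) - 1 ∧ c = ((map.headD []).length : Int) - 1
    · rw [if_pos hexit, needF_eq map _ r c hr hc, if_pos hexit.1, if_pos hexit.2]
      simp only [decide_eq_decide]; omega
    · rw [if_neg hexit,
        dif_neg (show ¬(r > (map.length : Int) - 1 ∨ c > ((map.headD []).length : Int) - 1)
          by omega),
        needF_eq map _ r c hr hc]
      by_cases hrlast : r = (map.length : Int) - 1
      · -- last row, c < w-1 : the down-recursion is immediately false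
        have hclt : c < ((map.headD []).length : Int) - 1 := by
          rcases not_and_or.mp hexit with h | h
          · exact absurd hrlast h
          · omega
        have hdown : UWgame (HP + pvCell map r c) (r + 1) c map = false := by
          rw [UWgame,
            if_neg (show ¬(r + 1 = (map.length : Int) - 1 ∧
              c = ((map.headD []).length : Int) - 1) by omega),
            dif_pos (show r + 1 > (map.length : Int) - 1 ∨
              c > ((map.headD []).length : Int) - 1 by omega)]
        have hright := ih (HP + pvCell map r c) r (c + 1) (by omega) hr (by omega)
        rw [if_pos hrlast, if_neg (show ¬(c = ((map.headD []).length : Int) - 1) by omega)]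
        by_cases hpos : HP + pvCell map r c > 0
        · rw [if_pos hpos, hdown, hright, Bool.false_or]
          simp only [decide_eq_decide]; omega
        · rw [if_neg hpos, eq_comm, decide_eq_false_iff_not]; omega
      · rw [if_neg hrlast]
        have hdown := ih (HP + pvCell map r c) (r + 1) c (by omega) (by omega) hc
        by_cases hclast : c = ((map.headD []).length : Int) - 1
        · -- last column, r < m-1 : the right-recursion is immediately false
          have hrightf : UWgame (HP + pvCell map r c) r (c + 1) map = false := by
            rw [UWgame,
              if_neg (show ¬(r = (map.length : Int) - 1 ∧
                c + 1 = ((map.headD []).length : Int) - 1) by omega),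
              dif_pos (show r > (map.length : Int) - 1 ∨
                c + 1 > ((map.headD []).length : Int) - 1 by omega)]
          rw [if_pos hclast]
          by_cases hpos : HP + pvCell map r c > 0
          · rw [if_pos hpos, hrightf, hdown, Bool.or_false]
            simp only [decide_eq_decide]; omega
          · rw [if_neg hpos, eq_comm, decide_eq_false_iff_not]; omega
        · have hright := ih (HP + pvCell map r c) r (c + 1) (by omega) hr (by omega)
          rw [if_neg hclast]
          by_cases hpos : HP + pvCell map r c > 0
          · rw [if_pos hpos, hdown, hright, Bool.eq_iff_iff]
            simp only [Bool.or_eq_true, decide_eq_true_eq]; omega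
          · rw [if_neg hpos, eq_comm, decide_eq_false_iff_not]; omega

-- the entry of the previous DP row at column c is needF of the row below
theorem pyGetD_needRow (map : List (List Int)) (w j r c : Int) (hjc : j ≤ c) (hcw : c ≤ w - 1) :
    PySem.List.pyGetD ((PySem.List.pyRange j w 1).map (needF map w r)) (c - j) 0 =
      needF map w r c := by
  have h1 : c - j = (((c - j).toNat : Nat) : Int) := by omega
  rw [h1, PySem.List.pyGetD_natCast]
  have hk : (c - j).toNat < ((PySem.List.pyRange j w 1).map (needF map w r)).length := by
    simp only [List.length_map, PySem.List.length_pyRange_one]; omega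
  rw [List.getD_eq_getElem _ _ hk, List.getElem_map, PySem.List.getElem_pyRange_one]
  congr 1; omega

-- column fold, first row processed (below = none), which is row m-1
theorem colfold_none (map : List (List Int)) (w j : Int) :
    ∀ (n : Nat) (c : Int), (w - c).toNat ≤ n → j ≤ c →
      (PySem.List.pyRange c w 1).foldr
          (fun x acc => pvColStep map w j ((map.length : Int) - 1) none acc x) [] =
        (PySem.List.pyRange c w 1).map (needF map w ((map.length : Int) - 1)) := by
  intro n
  induction n with
  | zero =>
    intro c hn hjc
    rw [PySem.List.pyRange_one_eq_nil (show w ≤ c by omega)]; rfl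
  | succ n ih =>
    intro c hn hjc
    by_cases hcw : c < w
    · rw [PySem.List.pyRange_one_cons hcw, List.foldr_cons, List.map_cons,
        ih (c + 1) (by omega) (by omega)]
      simp only [pvColStep]
      rw [needF_eq map w _ c (by omega) (by omega), if_pos rfl]
      by_cases hlast : c = w - 1
      · rw [if_pos hlast, if_pos hlast]
      · rw [if_neg hlast, if_neg hlast,
          PySem.List.pyRange_one_cons (show c + 1 < w by omega), List.map_cons,
          PySem.List.pyGetD_zero_cons]
    · rw [PySem.List.pyRange_one_eq_nil (show w ≤ c by omega)]; rfl

-- column fold, later rows (below = previous row's needF values), r < m-1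
theorem colfold_some (map : List (List Int)) (w j r : Int) (hr : r < (map.length : Int) - 1) :
    ∀ (n : Nat) (c : Int), (w - c).toNat ≤ n → j ≤ c →
      (PySem.List.pyRange c w 1).foldr
          (fun x acc =>
            pvColStep map w j r
              (some ((PySem.List.pyRange j w 1).map (needF map w (r + 1)))) acc x) [] =
        (PySem.List.pyRange c w 1).map (needF map w r) := by
  intro n
  induction n with
  | zero =>
    intro c hn hjc
    rw [PySem.List.pyRange_one_eq_nil (show w ≤ c by omega)]; rfl
  | succ n ih =>
    intro c hn hjc
    by_cases hcw : c < w
    · rw [PySem.List.pyRange_one_cons hcw, List.foldr_cons, List.map_cons,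
        ih (c + 1) (by omega) (by omega)]
      simp only [pvColStep]
      rw [needF_eq map w r c (by omega) (by omega),
        if_neg (show ¬(r = (map.length : Int) - 1) by omega),
        pyGetD_needRow map w j (r + 1) c hjc (by omega)]
      by_cases hlast : c = w - 1
      · rw [if_pos hlast, if_pos hlast]
      · rw [if_neg hlast, if_neg hlast,
          PySem.List.pyRange_one_cons (show c + 1 < w by omega), List.map_cons,
          PySem.List.pyGetD_zero_cons]
    · rw [PySem.List.pyRange_one_eq_nil (show w ≤ c by omega)]; rfl

-- row fold invariant: folding rows m-1 down to r yields needF for row r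
theorem rowfold (map : List (List Int)) (w j : Int) :
    ∀ (n : Nat) (r : Int), ((map.length : Int) - r).toNat ≤ n →
      r ≤ (map.length : Int) - 1 →
      (PySem.List.pyRange r (map.length : Int) 1).foldr
          (fun x acc => pvRowStep map w j acc x) none =
        some ((PySem.List.pyRange j w 1).map (needF map w r)) := by
  intro n
  induction n with
  | zero => intro r hn hr; omega
  | succ n ih =>
    intro r hn hr
    rw [PySem.List.pyRange_one_cons (show r < (map.length : Int) by omega), List.foldr_cons]
    by_cases hlast : r = (map.length : Int) - 1
    · rw [PySem.List.pyRange_one_eq_nil (show (map.length : Int) ≤ r + 1 by omega), List.foldr_nil]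
      simp only [pvRowStep]
      rw [PySem.List.pyRange_neg_one_eq_reverse,
        (show j - 1 + 1 = j by omega), (show w - 1 + 1 = w by omega), List.foldl_reverse,
        hlast, colfold_none map w j (w - j).toNat j (by omega) (by omega)]
    · rw [ih (r + 1) (by omega) (by omega)]
      simp only [pvRowStep]
      rw [PySem.List.pyRange_neg_one_eq_reverse,
        (show j - 1 + 1 = j by omega), (show w - 1 + 1 = w by omega), List.foldl_reverse,
        colfold_some map w j r (by omega) (w - j).toNat j (by omega) (by omega)]

-- ===== VERDICT (by name: the statement is the Claim_ definition above) =====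
theorem UWgame_spec : Claim_equal_UWgame := by
  unfold Claim_equal_UWgame
  intro HP i j map _ _
  unfold Spec_UWgame UWgame_alt
  by_cases hguard : i > (map.length : Int) - 1 ∨ j > ((map.headD []).length : Int) - 1
  · rw [if_pos (by simpa using hguard)]
    rw [UWgame, if_neg (by omega), dif_pos hguard]
  · replace hguard : i ≤ (map.length : Int) - 1 ∧ j ≤ ((map.headD []).length : Int) - 1 := by
      omega
    rw [if_neg (show ¬((decide (i > (map.length : Int) - 1) || decide (j > ((map.headD []).length : Int) - 1)) = true) by simp only [Bool.or_eq_true, decide_eq_true_eq]; omega)]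
    simp only []
    rw [PySem.List.pyRange_neg_one_eq_reverse,
      (show i - 1 + 1 = i by omega),
      (show (map.length : Int) - 1 + 1 = (map.length : Int) by omega), List.foldl_reverse,
      rowfold map ((map.headD []).length : Int) j ((map.length : Int) - i).toNat i
        (by omega) hguard.1,
      Option.getD_some,
      PySem.List.pyRange_one_cons (show j < ((map.headD []).length : Int) by omega),
      List.map_cons, PySem.List.pyGetD_zero_cons,
      UWgame_eq_needF map
        (((map.length : Int) - i) + (((map.headD []).length : Int) - j)).toNat HP i j
        (by omega) hguard.1 hguard.2]
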